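-- pv_equiv track=rewrite | github.com/sebstemmer/shoot-a-cbow | v3/preprocessing/preprocessing_utils.py | create_training_data_in_words_for_sentence
-- ===== SOURCE A (Python) =====
-- def create_bag_of_words(
--         word_idx_in_sentence: int,
--         sentence_in_words: list[str],
--         context_window_size: int
-- ) -> list[str]:
--     return [
--         sentence_in_words[idx_in_sentence] for idx_in_sentence in range(
--             word_idx_in_sentence-context_window_size,
--             word_idx_in_sentence+context_window_size + 1
--         ) if (idx_in_sentence >= 0 and idx_in_sentence < len(sentence_in_words) and idx_in_sentence != word_idx_in_sentence)
--     ]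
--
-- def create_training_data_in_words_for_sentence(
--         sentence_in_words: list[str],
--         context_window_size: int
-- ) -> list[tuple[str, list[str]]]:
--     return [
--         (word, create_bag_of_words(
--             word_idx_in_sentence=word_idx_in_sentence,
--             sentence_in_words=sentence_in_words,
--             context_window_size=context_window_size
--         )) for word_idx_in_sentence, word in enumerate(sentence_in_words) if len(create_bag_of_words(
--             word_idx_in_sentence=word_idx_in_sentence,
--             sentence_in_words=sentence_in_words,
--             context_window_size=context_window_size
--         )) > 0
--     ]
-- ===== SOURCE B (Python) =====
-- # B: offset-major ("diagonal") construction — instead of recomputing a window per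
-- # word (A's index-major range comprehension, evaluated twice per word), B loops over
-- # each nonzero offset d in [-w, w] once and appends sentence[i+d] to a contexts
-- # table for every position i where i+d is in range; neighbors arrive in ascending
-- # offset order, so each context equals A's ascending-index window.
--
-- def create_training_data_in_words_for_sentence(
--         sentence_in_words: list[str],
--         context_window_size: int
-- ) -> list[tuple[str, list[str]]]:
--     n = len(sentence_in_words)
--     contexts = [[] for _ in range(n)]
--     for offset in range(-context_window_size, context_window_size + 1):
--         if offset == 0:
--             continue
--         for i in range(max(0, -offset), min(n, n - offset)):
--             contexts[i].append(sentence_in_words[i + offset])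
--     return [(sentence_in_words[i], ctx) for i, ctx in enumerate(contexts) if ctx]
-- ===== Notes on version B (the rewrite author's own statement) =====
-- stated objective: alternative
-- what changed: B is offset-major: it loops once over each nonzero offset d in [-w, w] and appends sentence[i+d] into a contexts table for every in-range position i, then emits (word, contexts[i]) for non-empty contexts, instead of A's index-major pass that rebuilds each word's window with a filtered range comprehension evaluated twice per word.
import Mathlib
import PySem

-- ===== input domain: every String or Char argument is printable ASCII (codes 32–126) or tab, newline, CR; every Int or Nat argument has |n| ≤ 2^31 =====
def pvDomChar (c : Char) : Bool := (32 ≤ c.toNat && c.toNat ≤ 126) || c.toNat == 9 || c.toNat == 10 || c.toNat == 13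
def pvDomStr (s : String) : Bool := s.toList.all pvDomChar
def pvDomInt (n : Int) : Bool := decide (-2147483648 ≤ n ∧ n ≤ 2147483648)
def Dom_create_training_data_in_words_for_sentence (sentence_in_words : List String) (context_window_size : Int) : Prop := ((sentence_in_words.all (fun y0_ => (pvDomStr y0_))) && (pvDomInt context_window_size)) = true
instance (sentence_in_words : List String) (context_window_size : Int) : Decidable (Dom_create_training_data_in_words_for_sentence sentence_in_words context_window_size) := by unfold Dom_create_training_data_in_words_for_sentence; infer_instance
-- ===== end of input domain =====

-- B builds the context table offset-major (one pass per nonzero offset d, appending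
-- sentence[i+d] at every in-range i) instead of A's per-word filtered range window
-- computed twice per word (objective: alternative).

-- ===== PORT A =====
def create_bag_of_words (word_idx_in_sentence : Int) (sentence_in_words : List String) (context_window_size : Int) : List String :=
  ((PySem.List.pyRange (word_idx_in_sentence - context_window_size) (word_idx_in_sentence + context_window_size + 1) 1).filter
      (fun idx => decide (idx ≥ 0) && decide (idx < (sentence_in_words.length : Int)) && decide (idx ≠ word_idx_in_sentence))).map
    (fun idx => PySem.List.pyGetD sentence_in_words idx "")  -- idx is in range after the filter, so pyGetD is exact

def create_training_data_in_words_for_sentence (sentence_in_words : List String) (context_window_size : Int) : List (String × List String) :=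
  ((PySem.List.enumerate sentence_in_words).filter
      (fun p => decide (0 < (create_bag_of_words p.1 sentence_in_words context_window_size).length))).map
    (fun p => (p.2, create_bag_of_words p.1 sentence_in_words context_window_size))

-- ===== PORT B =====
def create_training_data_in_words_for_sentence_alt (sentence_in_words : List String) (context_window_size : Int) : List (String × List String) :=
  let n : Int := (sentence_in_words.length : Int)
  let contexts : List (List String) :=
    (PySem.List.pyRange (-context_window_size) (context_window_size + 1) 1).foldl
      (fun cs offset =>
        if offset = 0 then cs
        else
          (PySem.List.pyRange (max 0 (-offset)) (min n (n - offset)) 1).foldl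
            -- i ≥ 0 by the range's lower bound and i+offset is in range, so toNat / pyGetD are exact
            (fun cs i => cs.modify i.toNat (fun c => c ++ [PySem.List.pyGetD sentence_in_words (i + offset) ""])) cs)
      (List.replicate sentence_in_words.length [])
  ((PySem.List.enumerate contexts).filter (fun p => !p.2.isEmpty)).map
    (fun p => (PySem.List.pyGetD sentence_in_words p.1 "", p.2))

-- ===== PRECONDITION & SPEC =====
def Spec_create_training_data_in_words_for_sentence (sentence_in_words : List String) (context_window_size : Int) (out : List (String × List String)) : Prop := out = create_training_data_in_words_for_sentence_alt sentence_in_words context_window_size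
instance (sentence_in_words : List String) (context_window_size : Int) (out : List (String × List String)) : Decidable (Spec_create_training_data_in_words_for_sentence sentence_in_words context_window_size out) := by unfold Spec_create_training_data_in_words_for_sentence; infer_instance

-- ===== CLAIM (what is proved, stated in full; the proofs are below) =====
def Claim_equal_create_training_data_in_words_for_sentence : Prop := ∀ (sentence_in_words : List String) (context_window_size : Int), Dom_create_training_data_in_words_for_sentence sentence_in_words context_window_size → Spec_create_training_data_in_words_for_sentence sentence_in_words context_window_size (create_training_data_in_words_for_sentence sentence_in_words context_window_size)

-- ===== LEMMAS AND PROOFS =====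

-- the partial context of word i after all offsets in [-w, a) have been processed
def bagUpTo (xs : List String) (w a i : Int) : List String :=
  ((PySem.List.pyRange (-w) a 1).filter
      (fun d => decide (d ≠ 0) && decide (0 ≤ i + d) && decide (i + d < (xs.length : Int)))).map
    (fun d => PySem.List.pyGetD xs (i + d) "")

-- a fold of single-index modifies over range(lo, hi) is a mapIdx
lemma inner_fold {β : Type} (g : Int → β → β) (hi : Int) :
    ∀ (k : Nat) (lo : Int), 0 ≤ lo → (hi - lo).toNat = k → ∀ (L : List β),
      (PySem.List.pyRange lo hi 1).foldl (fun cs i => cs.modify i.toNat (g i)) L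
        = L.mapIdx (fun j c => if lo ≤ (j : Int) ∧ (j : Int) < hi then g (j : Int) c else c) := by
  intro k
  induction k with
  | zero =>
    intro lo hlo hk L
    rw [PySem.List.pyRange_one_eq_nil (by omega)]
    apply List.ext_getElem (by simp)
    intro j h1 h2
    simp only [List.foldl_nil] at h1 ⊢
    rw [List.getElem_mapIdx, if_neg (by omega)]
  | succ k ih =>
    intro lo hlo hk L
    rw [PySem.List.pyRange_one_cons (by omega)]
    simp only [List.foldl_cons]
    rw [ih (lo + 1) (by omega) (by omega)]
    apply List.ext_getElem (by simp)
    intro j h1 h2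
    rw [List.getElem_mapIdx, List.getElem_mapIdx, List.getElem_modify]
    by_cases hj : lo.toNat = j
    · have hji : (j : Int) = lo := by omega
      rw [if_pos hj, if_neg (by omega), if_pos (by omega), hji]
    · rw [if_neg hj]
      have hne : (j : Int) ≠ lo := by omega
      split_ifs with h1' h2' h2' <;> first | rfl | omega

lemma enum_map_enum {α β : Type} (xs : List α) (f : Int × α → β) :
    ∀ (s : Int), PySem.List.enumerate ((PySem.List.enumerate xs s).map f) s
      = (PySem.List.enumerate xs s).map (fun q => (q.1, f q)) := by
  induction xs with
  | nil => intro s; simp [PySem.List.enumerate_nil]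
  | cons x t ih =>
    intro s
    rw [PySem.List.enumerate_cons]
    simp only [List.map_cons]
    rw [PySem.List.enumerate_cons, ih (s + 1)]

lemma pyRange_shift (s : Int) (b : Int) :
    ∀ (k : Nat) (a : Int), (b - a).toNat = k →
      PySem.List.pyRange (s + a) (s + b) 1 = (PySem.List.pyRange a b 1).map (fun d => s + d) := by
  intro k
  induction k with
  | zero =>
    intro a hk
    rw [PySem.List.pyRange_one_eq_nil (by omega), PySem.List.pyRange_one_eq_nil (by omega)]
    rfl
  | succ k ih =>
    intro a hk
    rw [PySem.List.pyRange_one_cons (a := a) (by omega),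
        PySem.List.pyRange_one_cons (a := s + a) (by omega)]
    simp only [List.map_cons]
    rw [show s + a + 1 = s + (a + 1) by ring, ih (a + 1) (by omega)]

-- A's window for word i is the fully accumulated offset-major context
lemma bag_eq_bagUpTo (xs : List String) (w i : Int) :
    create_bag_of_words i xs w = bagUpTo xs w (w + 1) i := by
  unfold create_bag_of_words bagUpTo
  rw [show i - w = i + (-w) by ring, show i + w + 1 = i + (w + 1) by ring,
      pyRange_shift i (w + 1) ((w + 1) - (-w)).toNat (-w) rfl,
      List.filter_map, List.map_map]
  congr 1
  apply List.filter_congr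
  intro d _
  simp only [Function.comp_apply, ge_iff_le]
  rcases Decidable.em (0 ≤ i + d) with h1 | h1 <;>
  rcases Decidable.em (i + d < (xs.length : Int)) with h2 | h2 <;>
  rcases Decidable.em (d = 0) with h3 | h3 <;>
    simp [h1, h2, h3]

-- the outer fold accumulates bagUpTo, offset by offset
lemma outer_fold (xs : List String) (w : Int) :
    ∀ (k : Nat) (a : Int), -w ≤ a → a ≤ w + 1 → ((w + 1) - a).toNat = k →
      (PySem.List.pyRange a (w + 1) 1).foldl
        (fun cs offset =>
          if offset = 0 then cs
          else
            (PySem.List.pyRange (max 0 (-offset)) (min (xs.length : Int) ((xs.length : Int) - offset)) 1).foldl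
              (fun cs i => cs.modify i.toNat (fun c => c ++ [PySem.List.pyGetD xs (i + offset) ""])) cs)
        ((PySem.List.enumerate xs).map (fun q => bagUpTo xs w a q.1))
      = (PySem.List.enumerate xs).map (fun q => bagUpTo xs w (w + 1) q.1) := by
  intro k
  induction k with
  | zero =>
    intro a h1 h2 hk
    have ha : a = w + 1 := by omega
    subst ha
    rw [PySem.List.pyRange_one_eq_nil (by omega)]
    rfl
  | succ k ih =>
    intro a h1 h2 hk
    rw [PySem.List.pyRange_one_cons (by omega)]
    simp only [List.foldl_cons]
    have hstep : ∀ cs', cs' = (PySem.List.enumerate xs).map (fun q => bagUpTo xs w (a + 1) q.1) →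
        (PySem.List.pyRange (a + 1) (w + 1) 1).foldl
          (fun cs offset =>
            if offset = 0 then cs
            else
              (PySem.List.pyRange (max 0 (-offset)) (min (xs.length : Int) ((xs.length : Int) - offset)) 1).foldl
                (fun cs i => cs.modify i.toNat (fun c => c ++ [PySem.List.pyGetD xs (i + offset) ""])) cs)
          cs'
        = (PySem.List.enumerate xs).map (fun q => bagUpTo xs w (w + 1) q.1) := by
      intro cs' hcs'
      rw [hcs']
      exact ih (a + 1) (by omega) (by omega) (by omega)
    have hbag : ∀ (j : Nat), (j : Int) < (xs.length : Int) →
        bagUpTo xs w (a + 1) (j : Int)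
          = bagUpTo xs w a (j : Int) ++
            (if a ≠ 0 ∧ 0 ≤ (j : Int) + a ∧ (j : Int) + a < (xs.length : Int)
              then [PySem.List.pyGetD xs ((j : Int) + a) ""] else []) := by
      intro j hj
      unfold bagUpTo
      rw [show a + 1 = a + 1 by rfl, PySem.List.pyRange_one_succ_right (by omega)]
      rw [List.filter_append, List.map_append]
      congr 1
      rcases Decidable.em (a ≠ 0 ∧ 0 ≤ (j : Int) + a ∧ (j : Int) + a < (xs.length : Int)) with h | h
      · rw [if_pos h]
        simp [h.1, h.2.1, h.2.2]
      · rw [if_neg h]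
        have hnil : List.filter
            (fun d => decide (d ≠ 0) && decide (0 ≤ (j : Int) + d) && decide ((j : Int) + d < (xs.length : Int))) [a] = [] := by
          apply List.filter_eq_nil_iff.mpr
          intro x hx
          rw [List.mem_singleton] at hx
          subst hx
          simp only [Bool.and_eq_true, decide_eq_true_eq]
          tauto
        rw [hnil]
        rfl
    by_cases ha0 : a = 0
    · subst ha0
      rw [if_pos rfl]
      apply hstep
      apply List.ext_getElem (by simp)
      intro j hj1 hj2
      simp only [List.getElem_map, PySem.List.getElem_enumerate, zero_add]
      have hjlen : (j : Int) < (xs.length : Int) := by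
        rw [List.length_map, PySem.List.length_enumerate] at hj1; exact_mod_cast hj1
      rw [show (1 : Int) = 0 + 1 by ring, hbag j hjlen, if_neg (by tauto)]
      simp
    · rw [if_neg ha0]
      rw [inner_fold (fun i c => c ++ [PySem.List.pyGetD xs (i + a) ""])
            (min (xs.length : Int) ((xs.length : Int) - a))
            ((min (xs.length : Int) ((xs.length : Int) - a)) - max 0 (-a)).toNat
            (max 0 (-a)) (by omega) rfl]
      apply hstep
      apply List.ext_getElem (by simp)
      intro j hj1 hj2
      have hjn : j < xs.length := by
        simpa [PySem.List.length_enumerate] using hj2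
      have hjlen : (j : Int) < (xs.length : Int) := by exact_mod_cast hjn
      rw [List.getElem_mapIdx]
      simp only [List.getElem_map, PySem.List.getElem_enumerate, zero_add]
      rw [hbag j hjlen]
      by_cases hc : max 0 (-a) ≤ (j : Int) ∧ (j : Int) < min (xs.length : Int) ((xs.length : Int) - a)
      · rw [if_pos hc, if_pos (by constructor; exact ha0; omega)]
      · rw [if_neg hc, if_neg (by intro h; exact hc ⟨by omega, by omega⟩), List.append_nil]

lemma contexts_characterization (xs : List String) (w : Int) :
    (PySem.List.pyRange (-w) (w + 1) 1).foldl
      (fun cs offset =>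
        if offset = 0 then cs
        else
          (PySem.List.pyRange (max 0 (-offset)) (min (xs.length : Int) ((xs.length : Int) - offset)) 1).foldl
            (fun cs i => cs.modify i.toNat (fun c => c ++ [PySem.List.pyGetD xs (i + offset) ""])) cs)
      (List.replicate xs.length [])
    = (PySem.List.enumerate xs).map (fun q => bagUpTo xs w (w + 1) q.1) := by
  have hrepl : (List.replicate xs.length ([] : List String))
      = (PySem.List.enumerate xs).map (fun q => bagUpTo xs w (-w) q.1) := by
    apply List.ext_getElem (by simp [PySem.List.length_enumerate])
    intro j h1 h2
    simp only [List.getElem_replicate, List.getElem_map, PySem.List.getElem_enumerate]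
    unfold bagUpTo
    rw [PySem.List.pyRange_one_eq_nil (by omega)]
    rfl
  by_cases hw : -w ≤ w + 1
  · rw [hrepl]
    exact outer_fold xs w ((w + 1) - (-w)).toNat (-w) (by omega) (by omega) rfl
  · rw [PySem.List.pyRange_one_eq_nil (by omega), hrepl]
    simp only [List.foldl_nil]
    apply List.map_congr_left
    intro q _
    unfold bagUpTo
    rw [PySem.List.pyRange_one_eq_nil (by omega), PySem.List.pyRange_one_eq_nil (by omega)]

lemma snd_of_mem_enumerate (xs : List String) (q : Int × String)
    (hq : q ∈ PySem.List.enumerate xs) : PySem.List.pyGetD xs q.1 "" = q.2 := by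
  rcases (PySem.List.mem_enumerate_iff xs 0 q).mp hq with ⟨k, hk, hqeq⟩
  subst hqeq
  simp [PySem.List.pyGetD_natCast, List.getD_eq_getElem?_getD, hk]

-- ===== VERDICT (by name: the statement is the Claim_ definition above) =====
theorem create_training_data_in_words_for_sentence_spec : Claim_equal_create_training_data_in_words_for_sentence := by
  intro xs w _
  unfold Spec_create_training_data_in_words_for_sentence
  unfold create_training_data_in_words_for_sentence create_training_data_in_words_for_sentence_alt
  simp only []
  rw [contexts_characterization xs w, enum_map_enum xs (fun q => bagUpTo xs w (w + 1) q.1) 0,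
      List.filter_map, List.map_map]
  have hfilter : (PySem.List.enumerate xs).filter
      ((fun (p : Int × List String) => !p.2.isEmpty) ∘ (fun q => (q.1, bagUpTo xs w (w + 1) q.1)))
      = (PySem.List.enumerate xs).filter
        (fun p => decide (0 < (create_bag_of_words p.1 xs w).length)) := by
    apply List.filter_congr
    intro q _
    simp only [Function.comp_apply, bag_eq_bagUpTo xs w q.1]
    rcases Decidable.em ((bagUpTo xs w (w + 1) q.1).isEmpty = true) with h | h
    · simp [List.isEmpty_iff.mp h]
    · have hne : bagUpTo xs w (w + 1) q.1 ≠ [] := by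
        intro hnil; exact h (by simp [hnil])
      simp [h, List.length_pos_iff.mpr hne]
  rw [hfilter]
  apply List.map_congr_left
  intro q hq
  simp only [Function.comp_apply]
  rw [snd_of_mem_enumerate xs q (List.mem_of_mem_filter hq), bag_eq_bagUpTo xs w q.1]
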